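-- pv_equiv track=rewrite | github.com/flakepowders/2022-Spring-CS1-Final-Mock-Exam-Solutions | A05_popballoon.py | popballoon
-- ===== SOURCE A (Python) =====
-- def popballoon(L):
--     N, M = len(L), len(L[0])
--     balloon = 0
--     # 남은 풍선의 개수를 저장합니다.
--     for i in range(N):
--         for j in range(M):
--             if L[i][j] == 1:
--                 balloon += 1
--                 # 처음 풍선의 개수를 세 줍니다.
--     result = 0
--     # 시행 횟수를 저장해 놓는 변수입니다.
--     while balloon > 0:
--         # 남은 풍선의 개수가 0개 이상이라면, 시행을 이어갑니다.
--         result += 1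
--         if result % 2 == 1:
--             # 홀수 번째 시행에서는 동쪽에서 서쪽으로 풍선을 터트립니다.
--             for i in range(N):
--                 for j in range(M-1, -1, -1):
--                     if L[i][j] == 1:
--                         balloon -= 1
--                         L[i][j] = 0
--                         break
--                         # 각 행에 대해 풍선을 처음으로 찾았다면, 그 풍선을 제거하고 남은 풍선의 수를 1 빼줍니다.
--                         # 더 이상 터트리면 안 되므로 break문을 통해 루프를 빠져나갑니다.
--         else:
--             # 짝수 번째 시행에서는 남쪽에서 북쪽으로 풍선을 터트립니다.
--             # 이것을 제외하면 구현 알고리즘은 홀수 번째 시행과 완전히 같습니다.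
--             for j in range(M):
--                 for i in range(N-1, -1, -1):
--                     if L[i][j] == 1:
--                         balloon -= 1
--                         L[i][j] = 0
--                         break
--     return result
-- ===== SOURCE B (Python) =====
-- def popballoon(L):
--     N, M = len(L), len(L[0])
--     S = [(i, j) for i in range(N) for j in range(M) if L[i][j] == 1]
--     result = 0
--     while S:
--         result += 1
--         best = {}
--         if result % 2 == 1:
--             for (i, j) in S:
--                 if best.get(i, -1) < j:
--                     best[i] = j
--             S = [(i, j) for (i, j) in S if best[i] != j]
--         else:
--             for (i, j) in S:
--                 if best.get(j, -1) < i: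
--                     best[j] = i
--             S = [(i, j) for (i, j) in S if best[j] != i]
--     return result
-- ===== Notes on version B (the rewrite author's own statement) =====
-- stated objective: alternative
-- what changed: B simulates on the list of remaining balloon coordinates (per trial: one dict-building pass computing per-row/per-column maxima, then one filter pass) instead of A's in-place grid mutation with a fresh row/column scan of the grid on every trial.
import Mathlib
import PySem

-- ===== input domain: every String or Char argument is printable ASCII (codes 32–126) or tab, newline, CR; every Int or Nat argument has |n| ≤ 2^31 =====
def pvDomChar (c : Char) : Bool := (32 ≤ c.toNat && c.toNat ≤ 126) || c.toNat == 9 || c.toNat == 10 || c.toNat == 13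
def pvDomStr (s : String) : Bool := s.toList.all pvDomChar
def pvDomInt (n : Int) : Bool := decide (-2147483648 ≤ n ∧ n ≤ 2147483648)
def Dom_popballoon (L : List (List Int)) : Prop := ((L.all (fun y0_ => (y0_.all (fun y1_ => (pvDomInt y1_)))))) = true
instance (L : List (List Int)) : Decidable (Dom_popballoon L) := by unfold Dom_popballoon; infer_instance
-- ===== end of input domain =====

-- B is a different algorithm: instead of A's per-trial rescans of the grid, it simulates on the
-- list of remaining balloon coordinates (per trial: one pass building a per-row/per-column
-- maximum dict, then one filter pass).  Equivalence is about the RETURN value only: Python A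
-- zeroes the popped cells of L in place, B does not mutate L.

-- ===== PORT A =====
-- Python A reads L[i][j] only at indices that are in range for every input admitted by
-- Pre_popballoon, so the `getD` defaults (0 / []) used below are never consulted there.

-- inner `for j in range(M-1, -1, -1): ... break` of an odd trial, on one row
def aOddRow (row : List Int) : Nat → List Int × Bool
  | 0 => (row, false)
  | k+1 => if row.getD k 0 = 1 then (row.set k 0, true) else aOddRow row k

-- `for i in range(N):` of an odd trial (row by row; counts the pops)
def aOddStep (M : Nat) : List (List Int) → List (List Int) × Nat
  | [] => ([], 0)
  | row :: rest =>
    let rb := aOddRow row M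
    let rp := aOddStep M rest
    (rb.1 :: rp.1, (if rb.2 then 1 else 0) + rp.2)

-- inner `for i in range(N-1, -1, -1): ... break` of an even trial, on column j
def aColScan (g : List (List Int)) (j : Nat) : Nat → List (List Int) × Bool
  | 0 => (g, false)
  | k+1 => if (g.getD k []).getD j 0 = 1
           then (g.set k ((g.getD k []).set j 0), true)
           else aColScan g j k

-- `for j in range(M):` of an even trial
def aEvenStep (N : Nat) : List (List Int) → List Nat → List (List Int) × Nat
  | g, [] => (g, 0)
  | g, j :: js =>
    let gb := aColScan g j N
    let gp := aEvenStep N gb.1 js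
    (gp.1, (if gb.2 then 1 else 0) + gp.2)

-- `while balloon > 0:` — fuel-bounded; each iteration pops at least one balloon, so the
-- fuel `balloon.toNat + 1` supplied below is never exhausted before the loop condition fails.
def aLoop (M N : Nat) : Nat → List (List Int) → Int → Int → Int
  | 0, _, _, result => result
  | fuel+1, g, balloon, result =>
    if balloon > 0 then
      if (result + 1) % 2 = 1 then
        aLoop M N fuel (aOddStep M g).1 (balloon - ((aOddStep M g).2 : Int)) (result + 1)
      else
        aLoop M N fuel (aEvenStep N g (List.range M)).1
          (balloon - ((aEvenStep N g (List.range M)).2 : Int)) (result + 1)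
    else result

def popballoon (L : List (List Int)) : Int :=
  let M := (L.headD []).length
  let balloon : Int := L.foldl
    (fun acc row => (List.range M).foldl (fun a j => if row.getD j 0 = 1 then a + 1 else a) acc) 0
  aLoop M L.length (balloon.toNat + 1) L balloon 0

-- ===== PORT B =====
-- `S = [(i, j) for i in range(N) for j in range(M) if L[i][j] == 1]`
def bS (L : List (List Int)) (N M : Nat) : List (Int × Int) :=
  (List.range N).flatMap (fun i => (List.range M).filterMap (fun j =>
    if (L.getD i []).getD j 0 = 1 then some ((i : Int), (j : Int)) else none))

-- `for (i, j) in S: if best.get(i, -1) < j: best[i] = j`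
def bBestOdd (S : List (Int × Int)) : PySem.Dict Int Int :=
  S.foldl (fun d p => if d.getD p.1 (-1) < p.2 then d.insert p.1 p.2 else d) PySem.Dict.empty

-- `for (i, j) in S: if best.get(j, -1) < i: best[j] = i`
def bBestEven (S : List (Int × Int)) : PySem.Dict Int Int :=
  S.foldl (fun d p => if d.getD p.2 (-1) < p.1 then d.insert p.2 p.1 else d) PySem.Dict.empty

-- `while S:` — fuel-bounded as in aLoop; `best[i]` is total here because every key queried
-- was inserted while scanning S (values are ≥ 0, the default -1 forces the insert), so the
-- getD default -1 is never consulted.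
def bLoop : Nat → List (Int × Int) → Int → Int
  | 0, _, result => result
  | fuel+1, S, result =>
    if S.isEmpty then result
    else
      if (result + 1) % 2 = 1 then
        bLoop fuel (S.filter (fun p => !((bBestOdd S).getD p.1 (-1) == p.2))) (result + 1)
      else
        bLoop fuel (S.filter (fun p => !((bBestEven S).getD p.2 (-1) == p.1))) (result + 1)

def popballoon_alt (L : List (List Int)) : Int :=
  let M := (L.headD []).length
  let S := bS L L.length M
  bLoop (S.length + 1) S 0

-- ===== PRECONDITION & SPEC =====
-- Pre_ excludes exactly the inputs on which Python A raises: the empty list (len(L[0]) is an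
-- IndexError) and grids in which some row is shorter than the first row (L[i][j] is an
-- IndexError for j in range(len(L[0]))).  A returns normally on every other input.
def Pre_popballoon (L : List (List Int)) : Prop :=
  L ≠ [] ∧ ∀ row ∈ L, (L.headD []).length ≤ row.length
instance (L : List (List Int)) : Decidable (Pre_popballoon L) := by
  unfold Pre_popballoon; infer_instance
def pvWitness_popballoon : List (List Int) := [[1, 0], [0, 1]]

def Spec_popballoon (L : List (List Int)) (out : Int) : Prop := out = popballoon_alt L
instance (L : List (List Int)) (out : Int) : Decidable (Spec_popballoon L out) := by
  unfold Spec_popballoon; infer_instance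

-- ===== CLAIM (what is proved, stated in full; the proofs are below) =====
def Claim_equal_popballoon : Prop :=
  ∀ (L : List (List Int)), Dom_popballoon L → Pre_popballoon L →
    Spec_popballoon L (popballoon L)

-- ===== LEMMAS AND PROOFS =====

-- ---- ghost notions: downward first-hit search, balloon coordinates of a grid ----

-- first index hit when scanning k-1, k-2, …, 0 (the shape of both of A's inner loops)
def dfind (P : Nat → Bool) : Nat → Option Nat
  | 0 => none
  | k+1 => if P k then some k else dfind P k

def dToInt : Option Nat → Int
  | some t => (t : Int)
  | none => -1

def rmaxI (M : Nat) (row : List Int) : Int :=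
  dToInt (dfind (fun j => row.getD j 0 == 1) M)

def cmaxI (g : List (List Int)) (j0 : Nat) : Int :=
  dToInt (dfind (fun i => (g.getD i []).getD j0 0 == 1) g.length)

def rowCoords (M i : Nat) (row : List Int) : List (Int × Int) :=
  (List.range M).filterMap (fun j => if row.getD j 0 = 1 then some ((i : Int), (j : Int)) else none)

def coordsAux (M : Nat) : Nat → List (List Int) → List (Int × Int)
  | _, [] => []
  | i, row :: rest => rowCoords M i row ++ coordsAux M (i+1) rest

-- running maximum (over entries with the given key) of a coordinate list
def bvFold (key val : Int × Int → Int) (q : Int) (S : List (Int × Int)) (m : Int) : Int :=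
  S.foldl (fun m p => if key p = q then (if m < val p then val p else m) else m) m

-- ---- small generic list lemmas ----

theorem pvFilterMapFilter {α β : Type} (l : List α) (f : α → Option β) (p : β → Bool) :
    (l.filterMap f).filter p
      = l.filterMap (fun a => match f a with
          | some b => if p b then some b else none
          | none => none) := by
  induction l with
  | nil => rfl
  | cons a l ih =>
    simp only [List.filterMap_cons]
    cases hfa : f a with
    | none => simpa using ih
    | some b =>
      cases hpb : p b with
      | true => simp [hpb, ih]
      | false => simp [hpb, ih]

theorem pvFilterMapCongr {α β : Type} (l : List α) (f g : α → Option β)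
    (h : ∀ a ∈ l, f a = g a) : l.filterMap f = l.filterMap g := by
  induction l with
  | nil => rfl
  | cons a l ih =>
    simp only [List.filterMap_cons, h a (List.mem_cons_self ..)]
    rw [ih (fun b hb => h b (List.mem_cons_of_mem _ hb))]

theorem pvFilterFilter {α : Type} (l : List α) (p q : α → Bool) :
    (l.filter p).filter q = l.filter (fun a => p a && q a) := by
  induction l with
  | nil => rfl
  | cons a l ih =>
    by_cases hp : p a <;> by_cases hq : q a <;>
      simp [hp, hq, ih]

theorem pvAnyCongr {α : Type} (l : List α) (f g : α → Bool)
    (h : ∀ a ∈ l, f a = g a) : l.any f = l.any g := by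
  induction l with
  | nil => rfl
  | cons a l ih =>
    simp only [List.any_cons, h a (List.mem_cons_self ..)]
    rw [ih (fun b hb => h b (List.mem_cons_of_mem _ hb))]

theorem pvCountRemove {α : Type} [BEq α] [LawfulBEq α] (S : List α) (a : α)
    (hmem : a ∈ S) (hnd : S.Nodup) :
    (S.filter (fun p => !(p == a))).length + 1 = S.length := by
  induction S with
  | nil => cases hmem
  | cons x S ih =>
    rcases List.nodup_cons.mp hnd with ⟨hx, hS⟩
    by_cases hxa : x = a
    · subst hxa
      have hfe : S.filter (fun p => !(p == x)) = S := by
        apply List.filter_eq_self.mpr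
        intro b hb
        simp only [Bool.not_eq_eq_eq_not, Bool.not_true, beq_eq_false_iff_ne, ne_eq]
        intro hba; exact hx (hba ▸ hb)
      simp [hfe]
    · have hmem' : a ∈ S := by
        rcases List.mem_cons.mp hmem with h1 | h1
        · exact absurd h1.symm hxa
        · exact h1
      have hxb : ((x == a) : Bool) = false := beq_eq_false_iff_ne.mpr hxa
      have hrec := ih hmem' hS
      simp only [List.filter_cons, hxb, Bool.not_false, if_pos, List.length_cons]
      omega

theorem pvFlatMapCongr {α β : Type} (l : List α) (f g : α → List β)
    (h : ∀ a ∈ l, f a = g a) : l.flatMap f = l.flatMap g := by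
  induction l with
  | nil => rfl
  | cons a l ih =>
    simp only [List.flatMap_cons, h a (List.mem_cons_self ..)]
    rw [ih (fun b hb => h b (List.mem_cons_of_mem _ hb))]

theorem pvGetDSetSelf {α : Type} (l : List α) (t : Nat) (a d : α) (h : t < l.length) :
    (l.set t a).getD t d = a := by
  rw [List.getD_eq_getElem?_getD, List.getElem?_set]
  simp [h]

theorem pvGetDSetNe {α : Type} (l : List α) (t j : Nat) (a d : α) (h : j ≠ t) :
    (l.set t a).getD j d = l.getD j d := by
  rw [List.getD_eq_getElem?_getD, List.getElem?_set]
  rw [if_neg (by omega)]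
  rw [← List.getD_eq_getElem?_getD]

theorem pvGetDLt {α : Type} (l : List α) (t : Nat) (d : α) (h : l.getD t d ≠ d) :
    t < l.length := by
  by_contra h'
  exact h (List.getD_eq_default l d (by omega))

-- ---- dfind lemmas ----

theorem dfind_lt (P : Nat → Bool) : ∀ k t, dfind P k = some t → t < k := by
  intro k
  induction k with
  | zero => intro t h; simp [dfind] at h
  | succ k ih =>
    intro t h
    simp only [dfind] at h
    by_cases hp : P k
    · rw [if_pos hp] at h
      have := Option.some.inj h
      omega
    · rw [if_neg hp] at h
      have := ih t h
      omega

theorem dfind_some_P (P : Nat → Bool) : ∀ k t, dfind P k = some t → P t = true := by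
  intro k
  induction k with
  | zero => intro t h; simp [dfind] at h
  | succ k ih =>
    intro t h
    simp only [dfind] at h
    by_cases hp : P k
    · rw [if_pos hp] at h
      rw [← Option.some.inj h]
      exact hp
    · rw [if_neg hp] at h
      exact ih t h

theorem dfind_congr (P Q : Nat → Bool) :
    ∀ k, (∀ t, t < k → P t = Q t) → dfind P k = dfind Q k := by
  intro k
  induction k with
  | zero => intro _; rfl
  | succ k ih =>
    intro h
    simp only [dfind]
    rw [h k (by omega), ih (fun t ht => h t (by omega))]

theorem dfind_shift (P P' : Nat → Bool) (h : ∀ t, P (t+1) = P' t) :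
    ∀ n, dfind P (n+1)
      = (match dfind P' n with
         | some t => some (t+1)
         | none => if P 0 then some 0 else none) := by
  intro n
  induction n with
  | zero => simp [dfind]
  | succ n ih =>
    show (if P (n+1) then some (n+1) else dfind P (n+1)) = _
    rw [h n, ih]
    by_cases hp : P' n
    · simp only [dfind, hp, if_pos]
    · rw [if_neg hp]
      show (match dfind P' n with
            | some t => some (t+1)
            | none => if P 0 then some 0 else none)
          = (match (if P' n then some n else dfind P' n : Option Nat) with
            | some t => some (t+1)
            | none => if P 0 then some 0 else none)
      rw [if_neg hp]

-- ---- rowCoords / coordsAux lemmas ----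

theorem rowCoords_succ (M i : Nat) (row : List Int) :
    rowCoords (M+1) i row
      = rowCoords M i row ++ (if row.getD M 0 = 1 then [((i : Int), (M : Int))] else []) := by
  unfold rowCoords
  rw [List.range_succ, List.filterMap_append]
  congr 1
  by_cases hc : row.getD M 0 = 1
  · simp only [List.filterMap_cons, if_pos hc, List.filterMap_nil]
  · simp only [List.filterMap_cons, if_neg hc, List.filterMap_nil]

theorem mem_rowCoords (M i : Nat) (row : List Int) (p : Int × Int) :
    p ∈ rowCoords M i row
      ↔ ∃ j : Nat, j < M ∧ row.getD j 0 = 1 ∧ p = ((i : Int), (j : Int)) := by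
  constructor
  · intro hp
    rcases List.mem_filterMap.mp hp with ⟨j, hj, hfj⟩
    rw [List.mem_range] at hj
    by_cases hc : row.getD j 0 = 1
    · rw [if_pos hc] at hfj
      exact ⟨j, hj, hc, (Option.some.inj hfj).symm⟩
    · rw [if_neg hc] at hfj; cases hfj
  · rintro ⟨j, hj, hc, rfl⟩
    exact List.mem_filterMap.mpr ⟨j, List.mem_range.mpr hj, by rw [if_pos hc]⟩

theorem nodup_rowCoords (M i : Nat) (row : List Int) : (rowCoords M i row).Nodup := by
  induction M with
  | zero => simp [rowCoords]
  | succ M ih =>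
    rw [rowCoords_succ]
    refine List.Nodup.append ih (by split <;> simp) ?_
    intro p hp hq
    by_cases hc : row.getD M 0 = 1
    · rw [if_pos hc] at hq
      rcases (mem_rowCoords M i row p).mp hp with ⟨j, hj, _, rfl⟩
      simp only [List.mem_singleton, Prod.mk.injEq] at hq
      have hjM : j = M := by exact_mod_cast hq.2
      omega
    · rw [if_neg hc] at hq
      cases hq

theorem mem_coordsAux (M : Nat) : ∀ (g : List (List Int)) (i0 : Nat) (p : Int × Int),
    p ∈ coordsAux M i0 g
      ↔ ∃ t j : Nat, t < g.length ∧ j < M ∧ (g.getD t []).getD j 0 = 1 ∧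
          p = (((i0 + t : Nat) : Int), ((j : Nat) : Int)) := by
  intro g
  induction g with
  | nil => intro i0 p; simp [coordsAux]
  | cons row rest ih =>
    intro i0 p
    simp only [coordsAux, List.mem_append, mem_rowCoords, ih, List.length_cons]
    constructor
    · rintro (⟨j, hj, hc, rfl⟩ | ⟨t, j, ht, hj, hc, rfl⟩)
      · exact ⟨0, j, by omega, hj, by simpa using hc, by simp⟩
      · refine ⟨t+1, j, by omega, hj, by simpa using hc, ?_⟩
        have harith : (i0 + 1) + t = i0 + (t+1) := by omega
        rw [← harith]
    · rintro ⟨t, j, ht, hj, hc, rfl⟩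
      cases t with
      | zero =>
        left
        exact ⟨j, hj, by simpa using hc, by simp⟩
      | succ t =>
        right
        refine ⟨t, j, by omega, hj, by simpa using hc, ?_⟩
        have harith : (i0 + 1) + t = i0 + (t+1) := by omega
        rw [harith]

theorem nodup_coordsAux (M : Nat) : ∀ (g : List (List Int)) (i0 : Nat),
    (coordsAux M i0 g).Nodup := by
  intro g
  induction g with
  | nil => intro i0; simp [coordsAux]
  | cons row rest ih =>
    intro i0
    refine List.Nodup.append (nodup_rowCoords M i0 row) (ih (i0+1)) ?_
    intro p hp hq
    rcases (mem_rowCoords M i0 row p).mp hp with ⟨j, _, _, rfl⟩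
    rcases (mem_coordsAux M rest (i0+1) _).mp hq with ⟨t, j', _, _, _, heq⟩
    simp only [Prod.mk.injEq] at heq
    have : (i0 : Int) = ((i0 + 1 + t : Nat) : Int) := heq.1
    have : i0 = i0 + 1 + t := by exact_mod_cast this
    omega

theorem coordsAux_flat (M : Nat) : ∀ (g : List (List Int)) (i0 : Nat),
    coordsAux M i0 g
      = (List.range g.length).flatMap (fun t => rowCoords M (i0 + t) (g.getD t [])) := by
  intro g
  induction g with
  | nil => intro i0; simp [coordsAux]
  | cons row rest ih =>
    intro i0
    show rowCoords M i0 row ++ coordsAux M (i0+1) rest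
        = (List.range (rest.length + 1)).flatMap
            (fun t => rowCoords M (i0 + t) ((row :: rest).getD t []))
    rw [List.range_succ_eq_map, List.flatMap_cons]
    congr 1
    rw [ih (i0+1), List.flatMap_map]
    apply pvFlatMapCongr
    intro t _
    show rowCoords M ((i0+1) + t) (rest.getD t [])
        = rowCoords M (i0 + (t+1)) ((row :: rest).getD (t+1) [])
    rw [List.getD_cons_succ]
    congr 1
    omega

-- ---- bvFold lemmas ----

theorem bvFold_append (key val : Int × Int → Int) (q : Int) (X Y : List (Int × Int)) (m : Int) :
    bvFold key val q (X ++ Y) m = bvFold key val q Y (bvFold key val q X m) := by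
  unfold bvFold
  rw [List.foldl_append]

theorem bvFold_no_key (key val : Int × Int → Int) (q : Int) :
    ∀ (S : List (Int × Int)) (m : Int), (∀ p ∈ S, key p ≠ q) → bvFold key val q S m = m := by
  intro S
  induction S with
  | nil => intro m _; rfl
  | cons p S ih =>
    intro m h
    show bvFold key val q S (if key p = q then _ else m) = m
    rw [if_neg (h p (List.mem_cons_self ..))]
    exact ih m (fun b hb => h b (List.mem_cons_of_mem _ hb))

theorem maxfold_getD (key val : Int × Int → Int) :
    ∀ (S : List (Int × Int)) (d : PySem.Dict Int Int) (q : Int),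
      (S.foldl (fun d p => if d.getD (key p) (-1) < val p then d.insert (key p) (val p) else d)
        d).getD q (-1)
        = bvFold key val q S (d.getD q (-1)) := by
  intro S
  induction S with
  | nil => intro d q; rfl
  | cons p S ih =>
    intro d q
    show (S.foldl _ (if d.getD (key p) (-1) < val p then d.insert (key p) (val p) else d)).getD q (-1)
        = bvFold key val q S (if key p = q then (if d.getD q (-1) < val p then val p else d.getD q (-1)) else d.getD q (-1))
    by_cases hlt : d.getD (key p) (-1) < val p
    · rw [if_pos hlt, ih]
      congr 1
      rw [PySem.Dict.getD_insert]
      by_cases hk : key p = q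
      · rw [if_pos hk.symm, if_pos hk, if_pos (hk ▸ hlt)]
      · rw [if_neg (fun hh => hk hh.symm), if_neg hk]
    · rw [if_neg hlt, ih]
      congr 1
      by_cases hk : key p = q
      · rw [if_pos hk, if_neg (hk ▸ hlt)]
      · rw [if_neg hk]
theorem bvRow_fst (i : Nat) (row : List Int) :
    ∀ (M : Nat) (m : Int),
      bvFold Prod.fst Prod.snd (i : Int) (rowCoords M i row) m
        = (match dfind (fun j => row.getD j 0 == 1) M with
           | some t => if m < (t : Int) then (t : Int) else m
           | none => m) := by
  intro M
  induction M with
  | zero => intro m; rfl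
  | succ M ih =>
    intro m
    rw [rowCoords_succ, bvFold_append, ih]
    by_cases hc : row.getD M 0 = 1
    · rw [if_pos hc]
      show bvFold Prod.fst Prod.snd (↑i) [((i : Int), (M : Int))]
            (match dfind (fun j => row.getD j 0 == 1) M with
             | some t => if m < (t : Int) then (t : Int) else m
             | none => m)
          = (match (if row.getD M 0 == 1 then some M else dfind (fun j => row.getD j 0 == 1) M : Option Nat) with
             | some t => if m < (t : Int) then (t : Int) else m
             | none => m)
      rw [if_pos (by simpa using hc)]
      cases hd : dfind (fun j => row.getD j 0 == 1) M with
      | none =>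
        show (if (i : Int) = (i : Int) then (if m < (M : Int) then (M : Int) else m) else m)
            = (if m < (M : Int) then (M : Int) else m)
        rw [if_pos rfl]
      | some t =>
        have htM : t < M := dfind_lt _ M t hd
        show (if (i : Int) = (i : Int) then
                (if (if m < (t : Int) then (t : Int) else m) < (M : Int) then (M : Int)
                 else (if m < (t : Int) then (t : Int) else m))
              else (if m < (t : Int) then (t : Int) else m))
            = (if m < (M : Int) then (M : Int) else m)
        rw [if_pos rfl]
        split_ifs <;> omega
    · rw [if_neg hc]
      show (match dfind (fun j => row.getD j 0 == 1) M with
            | some t => if m < (t : Int) then (t : Int) else m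
            | none => m)
          = (match (if row.getD M 0 == 1 then some M else dfind (fun j => row.getD j 0 == 1) M : Option Nat) with
             | some t => if m < (t : Int) then (t : Int) else m
             | none => m)
      rw [if_neg (by simpa using hc)]
theorem bvRow_snd (i j0 : Nat) (row : List Int) :
    ∀ (M : Nat) (m : Int),
      bvFold Prod.snd Prod.fst (j0 : Int) (rowCoords M i row) m
        = if j0 < M ∧ row.getD j0 0 = 1 then (if m < (i : Int) then (i : Int) else m) else m := by
  intro M
  induction M with
  | zero =>
    intro m
    rw [if_neg (by omega)]
    rfl
  | succ M ih =>
    intro m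
    have hnil : ∀ x : Int, bvFold Prod.snd Prod.fst (j0 : Int) [] x = x := fun x => rfl
    have hone : ∀ x : Int, bvFold Prod.snd Prod.fst (j0 : Int) [((i : Int), (M : Int))] x
        = if ((M : Nat) : Int) = ((j0 : Nat) : Int)
          then (if x < (i : Int) then (i : Int) else x) else x :=
      fun x => rfl
    rw [rowCoords_succ, bvFold_append, ih m]
    by_cases hc : row.getD M 0 = 1
    · rw [if_pos hc, hone]
      by_cases hjM : j0 = M
      · have hcast : ((M : Nat) : Int) = ((j0 : Nat) : Int) := by exact_mod_cast hjM.symm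
        rw [if_neg (show ¬(j0 < M ∧ row.getD j0 0 = 1) from by rintro ⟨h1, _⟩; omega),
          if_pos hcast,
          if_pos (show j0 < M + 1 ∧ row.getD j0 0 = 1 from ⟨by omega, by rw [hjM]; exact hc⟩)]
      · have hne : ((M : Nat) : Int) ≠ ((j0 : Nat) : Int) :=
          fun hh => hjM (by exact_mod_cast hh.symm)
        rw [if_neg hne]
        have hiff : (j0 < M ∧ row.getD j0 0 = 1) ↔ (j0 < M + 1 ∧ row.getD j0 0 = 1) := by
          constructor
          · rintro ⟨h1, h2⟩; exact ⟨by omega, h2⟩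
          · rintro ⟨h1, h2⟩
            refine ⟨?_, h2⟩
            by_cases hx : j0 = M
            · exact absurd hx hjM
            · omega
        rw [if_congr hiff rfl rfl]
    · rw [if_neg hc, hnil]
      have hiff : (j0 < M ∧ row.getD j0 0 = 1) ↔ (j0 < M + 1 ∧ row.getD j0 0 = 1) := by
        constructor
        · rintro ⟨h1, h2⟩; exact ⟨by omega, h2⟩
        · rintro ⟨h1, h2⟩
          refine ⟨?_, h2⟩
          by_cases hx : j0 = M
          · exact absurd (hx ▸ h2) hc
          · omega
      rw [if_congr hiff rfl rfl]

theorem bestOdd_getD (M : Nat) : ∀ (g : List (List Int)) (i0 t : Nat), t < g.length →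
    bvFold Prod.fst Prod.snd ((i0 + t : Nat) : Int) (coordsAux M i0 g) (-1)
      = rmaxI M (g.getD t []) := by
  intro g
  induction g with
  | nil => intro i0 t h; simp at h
  | cons row rest ih =>
    intro i0 t h
    show bvFold Prod.fst Prod.snd _ (rowCoords M i0 row ++ coordsAux M (i0+1) rest) (-1) = _
    rw [bvFold_append]
    cases t with
    | zero =>
      have hq : ((i0 + 0 : Nat) : Int) = ((i0 : Nat) : Int) := by norm_num
      have hnk : ∀ m : Int,
          bvFold Prod.fst Prod.snd ((i0 : Nat) : Int) (coordsAux M (i0+1) rest) m = m := by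
        intro m
        apply bvFold_no_key
        intro p hp
        rcases (mem_coordsAux M rest (i0+1) p).mp hp with ⟨t', j', _, _, _, rfl⟩
        simp only [ne_eq, Nat.cast_inj]
        omega
      rw [hq, bvRow_fst, hnk]
      show (match dfind (fun j => row.getD j 0 == 1) M with
            | some t => if (-1 : Int) < (t : Int) then (t : Int) else (-1 : Int)
            | none => (-1 : Int)) = rmaxI M ((row :: rest).getD 0 [])
      rw [List.getD_cons_zero]
      unfold rmaxI dToInt
      cases hd : dfind (fun j => row.getD j 0 == 1) M with
      | none => rfl
      | some u =>
        show (if (-1 : Int) < (u : Int) then (u : Int) else (-1 : Int)) = (u : Int)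
        rw [if_pos (by omega)]
    | succ t' =>
      have hnk : bvFold Prod.fst Prod.snd ((i0 + (t'+1) : Nat) : Int) (rowCoords M i0 row) (-1)
          = -1 := by
        apply bvFold_no_key
        intro p hp
        rcases (mem_rowCoords M i0 row p).mp hp with ⟨j, _, _, rfl⟩
        simp only [ne_eq, Nat.cast_inj]
        omega
      rw [hnk]
      have harith : ((i0 + (t'+1) : Nat) : Int) = (((i0+1) + t' : Nat) : Int) := by
        push_cast; ring
      rw [harith, ih (i0+1) t' (by simpa using h), List.getD_cons_succ]
theorem bvCol (M j0 : Nat) (hj : j0 < M) :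
    ∀ (g : List (List Int)) (i0 : Nat) (m : Int),
      bvFold Prod.snd Prod.fst (j0 : Int) (coordsAux M i0 g) m
        = (match dfind (fun t => (g.getD t []).getD j0 0 == 1) g.length with
           | some t => if m < ((i0 + t : Nat) : Int) then ((i0 + t : Nat) : Int) else m
           | none => m) := by
  intro g
  induction g with
  | nil => intro i0 m; rfl
  | cons row rest ih =>
    intro i0 m
    show bvFold Prod.snd Prod.fst _ (rowCoords M i0 row ++ coordsAux M (i0+1) rest) m = _
    rw [bvFold_append, bvRow_snd, ih (i0+1)]
    show _ = (match dfind (fun t => ((row :: rest).getD t []).getD j0 0 == 1) (rest.length + 1) with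
              | some t => if m < ((i0 + t : Nat) : Int) then ((i0 + t : Nat) : Int) else m
              | none => m)
    rw [dfind_shift (fun t => ((row :: rest).getD t []).getD j0 0 == 1)
        (fun t => (rest.getD t []).getD j0 0 == 1)
        (fun t => by
          show (((row :: rest).getD (t+1) []).getD j0 0 == 1)
              = ((rest.getD t []).getD j0 0 == 1)
          rw [List.getD_cons_succ]) rest.length]
    cases hd : dfind (fun t => (rest.getD t []).getD j0 0 == 1) rest.length with
    | some u =>
      show (if (if j0 < M ∧ row.getD j0 0 = 1 then (if m < (i0 : Int) then (i0 : Int) else m) else m)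
              < (((i0+1) + u : Nat) : Int)
            then (((i0+1) + u : Nat) : Int)
            else (if j0 < M ∧ row.getD j0 0 = 1 then (if m < (i0 : Int) then (i0 : Int) else m) else m))
          = (if m < ((i0 + (u+1) : Nat) : Int) then ((i0 + (u+1) : Nat) : Int) else m)
      by_cases hr : j0 < M ∧ row.getD j0 0 = 1
      · simp only [if_pos hr]
        split_ifs <;> push_cast at * <;> omega
      · simp only [if_neg hr]
        split_ifs <;> push_cast at * <;> omega
    | none =>
      show (if j0 < M ∧ row.getD j0 0 = 1 then (if m < (i0 : Int) then (i0 : Int) else m) else m)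
          = (match (if ((row :: rest).getD 0 []).getD j0 0 == 1 then some 0 else none : Option Nat) with
             | some t => if m < ((i0 + t : Nat) : Int) then ((i0 + t : Nat) : Int) else m
             | none => m)
      by_cases hr : row.getD j0 0 = 1
      · rw [if_pos (show j0 < M ∧ row.getD j0 0 = 1 from ⟨hj, hr⟩),
          if_pos (show (((row :: rest).getD 0 []).getD j0 0 == 1) = true from by simpa using hr)]
        show (if m < (i0 : Int) then (i0 : Int) else m)
            = (if m < ((i0 + 0 : Nat) : Int) then ((i0 + 0 : Nat) : Int) else m)
        norm_num
      · rw [if_neg (show ¬(j0 < M ∧ row.getD j0 0 = 1) from fun hh => hr hh.2),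
          if_neg (show ¬((((row :: rest).getD 0 []).getD j0 0 == 1) = true) from by simpa using hr)]
-- ---- A-side characterisations ----

theorem aOddRow_eq (row : List Int) : ∀ k,
    aOddRow row k
      = (match dfind (fun j => row.getD j 0 == 1) k with
         | some t => (row.set t 0, true)
         | none => (row, false)) := by
  intro k
  induction k with
  | zero => rfl
  | succ k ih =>
    show (if row.getD k 0 = 1 then (row.set k 0, true) else aOddRow row k) = _
    by_cases hc : row.getD k 0 = 1
    · rw [if_pos hc]
      show _ = (match (if row.getD k 0 == 1 then some k
                       else dfind (fun j => row.getD j 0 == 1) k : Option Nat) with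
                | some t => (row.set t 0, true)
                | none => (row, false))
      rw [if_pos (by simpa using hc)]
    · rw [if_neg hc, ih]
      show _ = (match (if row.getD k 0 == 1 then some k
                       else dfind (fun j => row.getD j 0 == 1) k : Option Nat) with
                | some t => (row.set t 0, true)
                | none => (row, false))
      rw [if_neg (by simpa using hc)]

theorem aColScan_eq (g : List (List Int)) (j : Nat) : ∀ k,
    aColScan g j k
      = (match dfind (fun i => (g.getD i []).getD j 0 == 1) k with
         | some t => (g.set t ((g.getD t []).set j 0), true)
         | none => (g, false)) := by
  intro k
  induction k with
  | zero => rfl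
  | succ k ih =>
    show (if (g.getD k []).getD j 0 = 1 then (g.set k ((g.getD k []).set j 0), true)
          else aColScan g j k) = _
    by_cases hc : (g.getD k []).getD j 0 = 1
    · rw [if_pos hc]
      show _ = (match (if (g.getD k []).getD j 0 == 1 then some k
                       else dfind (fun i => (g.getD i []).getD j 0 == 1) k : Option Nat) with
                | some t => (g.set t ((g.getD t []).set j 0), true)
                | none => (g, false))
      rw [if_pos (by simpa using hc)]
    · rw [if_neg hc, ih]
      show _ = (match (if (g.getD k []).getD j 0 == 1 then some k
                       else dfind (fun i => (g.getD i []).getD j 0 == 1) k : Option Nat) with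
                | some t => (g.set t ((g.getD t []).set j 0), true)
                | none => (g, false))
      rw [if_neg (by simpa using hc)]

theorem length_aOddStep (M : Nat) : ∀ g : List (List Int), (aOddStep M g).1.length = g.length := by
  intro g
  induction g with
  | nil => rfl
  | cons row rest ih => simp [aOddStep, ih]

theorem length_aEvenStep (N : Nat) :
    ∀ (js : List Nat) (g : List (List Int)), (aEvenStep N g js).1.length = g.length := by
  intro js
  induction js with
  | nil => intro g; rfl
  | cons j js ih =>
    intro g
    show (aEvenStep N (aColScan g j N).1 js).1.length = g.length
    rw [ih (aColScan g j N).1]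
    rw [aColScan_eq]
    cases hd : dfind (fun i => (g.getD i []).getD j 0 == 1) N with
    | none => rfl
    | some t => simp

-- ---- effect of zeroing one cell on the coordinate list ----

theorem setRow_coords (M i t : Nat) (row : List Int) (h : row.getD t 0 = 1) :
    rowCoords M i (row.set t 0)
      = (rowCoords M i row).filter (fun p => !((t : Int) == p.2)) := by
  have ht : t < row.length := pvGetDLt row t 0 (by rw [h]; norm_num)
  unfold rowCoords
  rw [pvFilterMapFilter]
  apply pvFilterMapCongr
  intro j hj
  by_cases hjt : j = t
  · rw [hjt]
    rw [if_neg (show ¬((row.set t 0).getD t 0 = 1) from by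
          rw [pvGetDSetSelf row t 0 0 ht]; norm_num)]
    rw [if_pos h]
    show (none : Option (Int × Int))
        = (if !((t : Int) == (t : Int)) then some ((i : Int), (t : Int)) else none)
    simp
  · rw [pvGetDSetNe row t j 0 0 hjt]
    by_cases hc : row.getD j 0 = 1
    · rw [if_pos hc]
      show some ((i : Int), (j : Int))
          = (if !((t : Int) == (j : Int)) then some ((i : Int), (j : Int)) else none)
      rw [show ((t : Int) == (j : Int)) = false from
          beq_eq_false_iff_ne.mpr (fun hh => hjt (by exact_mod_cast hh.symm))]
      rfl
    · rw [if_neg hc]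

theorem getD_grid_lt (g : List (List Int)) (t j : Nat) (h : (g.getD t []).getD j 0 = 1) :
    t < g.length := by
  apply pvGetDLt g t []
  intro hg
  rw [hg] at h
  simp [List.getD] at h

theorem setGrid_coords (M : Nat) : ∀ (g : List (List Int)) (i0 t j : Nat),
    (g.getD t []).getD j 0 = 1 → j < M →
    coordsAux M i0 (g.set t ((g.getD t []).set j 0))
      = (coordsAux M i0 g).filter
          (fun p => !((p.1 == ((i0 + t : Nat) : Int)) && (p.2 == (j : Int)))) := by
  intro g
  induction g with
  | nil =>
    intro i0 t j h _
    simp [List.getD] at h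
  | cons row rest ih =>
    intro i0 t j h hj
    cases t with
    | zero =>
      rw [List.getD_cons_zero] at h
      show coordsAux M i0 ((row.set j 0) :: rest) = _
      show rowCoords M i0 (row.set j 0) ++ coordsAux M (i0+1) rest = _
      rw [show coordsAux M i0 (row :: rest) = rowCoords M i0 row ++ coordsAux M (i0+1) rest
          from rfl]
      rw [List.filter_append]
      congr 1
      · rw [setRow_coords M i0 j row h]
        apply List.filter_congr
        intro p hp
        rcases (mem_rowCoords M i0 row p).mp hp with ⟨j', _, _, rfl⟩
        show (!((j : Int) == (j' : Int))) = !(((i0 : Int) == ((i0 + 0 : Nat) : Int)) && ((j' : Int) == (j : Int)))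
        have h0 : ((i0 : Nat) : Int) = ((i0 + 0 : Nat) : Int) := by norm_num
        rw [← h0, beq_self_eq_true, Bool.true_and]
        by_cases hjj : j' = j
        · subst hjj; simp
        · have h1 : ¬ ((j : Int) = (j' : Int)) := fun hh => hjj (by exact_mod_cast hh.symm)
          have h2 : ¬ ((j' : Int) = (j : Int)) := fun hh => hjj (by exact_mod_cast hh)
          simp [h1, h2]
      · rw [eq_comm]
        apply List.filter_eq_self.mpr
        intro p hp
        rcases (mem_coordsAux M rest (i0+1) p).mp hp with ⟨t', j', _, _, _, rfl⟩
        have hne : ((i0 + 1 + t' : Nat) : Int) ≠ ((i0 + 0 : Nat) : Int) := by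
          intro hh
          have : i0 + 1 + t' = i0 + 0 := by exact_mod_cast hh
          omega
        show (!((((i0 + 1 + t' : Nat) : Int)) == (((i0 + 0 : Nat) : Int))
              && ((j' : Int) == (j : Int)))) = true
        rw [beq_eq_false_iff_ne.mpr hne, Bool.false_and, Bool.not_false]
    | succ t' =>
      rw [List.getD_cons_succ] at h
      show coordsAux M i0 (row :: rest.set t' ((rest.getD t' []).set j 0)) = _
      show rowCoords M i0 row ++ coordsAux M (i0+1) (rest.set t' ((rest.getD t' []).set j 0)) = _
      rw [show coordsAux M i0 (row :: rest) = rowCoords M i0 row ++ coordsAux M (i0+1) rest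
          from rfl]
      rw [List.filter_append]
      congr 1
      · rw [eq_comm]
        apply List.filter_eq_self.mpr
        intro p hp
        rcases (mem_rowCoords M i0 row p).mp hp with ⟨j', _, _, rfl⟩
        have hne : ((i0 : Nat) : Int) ≠ ((i0 + (t'+1) : Nat) : Int) := by
          intro hh
          have : i0 = i0 + (t'+1) := by exact_mod_cast hh
          omega
        show (!(((i0 : Int)) == (((i0 + (t'+1) : Nat) : Int))
              && ((j' : Int) == (j : Int)))) = true
        rw [beq_eq_false_iff_ne.mpr hne, Bool.false_and, Bool.not_false]
      · have harith : ((i0 + 1) + t' : Nat) = (i0 + (t'+1) : Nat) := by omega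
        rw [ih (i0+1) t' j h hj, harith]

theorem setGrid_len (M : Nat) (g : List (List Int)) (i0 t j : Nat)
    (h : (g.getD t []).getD j 0 = 1) (hj : j < M) :
    ((coordsAux M i0 g).filter
        (fun p => !((p.1 == ((i0 + t : Nat) : Int)) && (p.2 == (j : Int))))).length + 1
      = (coordsAux M i0 g).length := by
  have htg : t < g.length := getD_grid_lt g t j h
  have hmem : ((((i0 + t : Nat) : Int)), ((j : Nat) : Int)) ∈ coordsAux M i0 g :=
    (mem_coordsAux M g i0 _).mpr ⟨t, j, htg, hj, h, rfl⟩
  have hnd := nodup_coordsAux M g i0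
  have hcnt := pvCountRemove (coordsAux M i0 g) ((((i0 + t : Nat) : Int)), ((j : Nat) : Int))
    hmem hnd
  rw [show (fun p : Int × Int => !((p.1 == ((i0 + t : Nat) : Int)) && (p.2 == (j : Int))))
      = (fun p : Int × Int => !(p == ((((i0 + t : Nat) : Int)), ((j : Nat) : Int)))) from rfl]
  exact hcnt

theorem pvBeqComm (a b : Int) : (a == b) = (b == a) := by
  by_cases h : a = b
  · rw [h]
  · rw [beq_eq_false_iff_ne.mpr h, beq_eq_false_iff_ne.mpr (Ne.symm h)]

-- ---- one odd trial ----

theorem oddStep_main (M : Nat) : ∀ (g : List (List Int)) (i0 : Nat) (f : Int → Int),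
    (∀ t, t < g.length → f ((i0 + t : Nat) : Int) = rmaxI M (g.getD t [])) →
    coordsAux M i0 (aOddStep M g).1
        = (coordsAux M i0 g).filter (fun p => !(f p.1 == p.2))
    ∧ ((aOddStep M g).2 : Int)
        + (((coordsAux M i0 g).filter (fun p => !(f p.1 == p.2))).length : Int)
      = ((coordsAux M i0 g).length : Int) := by
  intro g
  induction g with
  | nil => intro i0 f _; exact ⟨rfl, by simp [aOddStep, coordsAux]⟩
  | cons row rest ih =>
    intro i0 f hf
    have hf0 : f ((i0 : Nat) : Int) = rmaxI M row := by
      have h0 := hf 0 (by simp)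
      simpa using h0
    have hfS : ∀ t, t < rest.length →
        f (((i0+1) + t : Nat) : Int) = rmaxI M (rest.getD t []) := by
      intro t ht
      have harith : ((i0 + 1) + t : Nat) = (i0 + (t+1) : Nat) := by omega
      rw [harith]
      have h1 := hf (t+1) (by simp; omega)
      simpa using h1
    obtain ⟨ih1, ih2⟩ := ih (i0+1) f hfS
    have hstep : aOddStep M (row :: rest)
        = ((aOddRow row M).1 :: (aOddStep M rest).1,
           (if (aOddRow row M).2 then 1 else 0) + (aOddStep M rest).2) := rfl
    rw [hstep, aOddRow_eq row M]
    cases hd : dfind (fun j => row.getD j 0 == 1) M with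
    | none =>
      have hrm : rmaxI M row = -1 := by unfold rmaxI dToInt; rw [hd]
      have hhead : (rowCoords M i0 row).filter (fun p => !(f p.1 == p.2))
          = rowCoords M i0 row := by
        apply List.filter_eq_self.mpr
        intro p hp
        rcases (mem_rowCoords M i0 row p).mp hp with ⟨j', _, _, rfl⟩
        show (!(f ((i0 : Nat) : Int) == ((j' : Nat) : Int))) = true
        rw [hf0, hrm,
          show ((-1 : Int) == ((j' : Nat) : Int)) = false from
            beq_eq_false_iff_ne.mpr (by push_cast; omega)]
        rfl
      constructor
      · show rowCoords M i0 row ++ coordsAux M (i0+1) (aOddStep M rest).1 = _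
        rw [show coordsAux M i0 (row :: rest)
            = rowCoords M i0 row ++ coordsAux M (i0+1) rest from rfl,
          List.filter_append, hhead, ih1]
      · show (((0 + (aOddStep M rest).2 : Nat)) : Int) + _ = _
        rw [show coordsAux M i0 (row :: rest)
            = rowCoords M i0 row ++ coordsAux M (i0+1) rest from rfl,
          List.filter_append, hhead]
        simp only [List.length_append]
        push_cast at ih2 ⊢
        omega
    | some u =>
      have hPu : row.getD u 0 = 1 := by
        have hp := dfind_some_P _ M u hd
        simpa using hp
      have huM : u < M := dfind_lt _ M u hd
      have hrm : rmaxI M row = (u : Int) := by unfold rmaxI dToInt; rw [hd]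
      have hhead : (rowCoords M i0 row).filter (fun p => !(f p.1 == p.2))
          = (rowCoords M i0 row).filter (fun p => !((u : Int) == p.2)) := by
        apply List.filter_congr
        intro p hp
        rcases (mem_rowCoords M i0 row p).mp hp with ⟨j', _, _, rfl⟩
        show (!(f ((i0 : Nat) : Int) == ((j' : Nat) : Int)))
            = (!(((u : Nat) : Int) == ((j' : Nat) : Int)))
        rw [hf0, hrm]
      have hfc : (rowCoords M i0 row).filter (fun p => !((u : Int) == p.2))
          = (rowCoords M i0 row).filter
              (fun p => !(p == (((i0 : Nat) : Int), ((u : Nat) : Int)))) := by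
        apply List.filter_congr
        intro p hp
        rcases (mem_rowCoords M i0 row p).mp hp with ⟨j', _, _, rfl⟩
        show (!(((u : Nat) : Int) == ((j' : Nat) : Int)))
            = (!(((((i0 : Nat) : Int), ((j' : Nat) : Int)))
                == ((((i0 : Nat) : Int), ((u : Nat) : Int)))))
        rw [show (((((i0 : Nat) : Int), ((j' : Nat) : Int)))
              == ((((i0 : Nat) : Int), ((u : Nat) : Int))))
            = ((((i0 : Nat) : Int) == ((i0 : Nat) : Int))
                && (((j' : Nat) : Int) == ((u : Nat) : Int))) from rfl,
          beq_self_eq_true, Bool.true_and, pvBeqComm]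
      have hcnt : ((rowCoords M i0 row).filter (fun p => !((u : Int) == p.2))).length + 1
          = (rowCoords M i0 row).length := by
        rw [hfc]
        exact pvCountRemove (rowCoords M i0 row) (((i0 : Nat) : Int), ((u : Nat) : Int))
          ((mem_rowCoords M i0 row _).mpr ⟨u, huM, hPu, rfl⟩) (nodup_rowCoords M i0 row)
      constructor
      · show rowCoords M i0 (row.set u 0) ++ coordsAux M (i0+1) (aOddStep M rest).1 = _
        rw [show coordsAux M i0 (row :: rest)
            = rowCoords M i0 row ++ coordsAux M (i0+1) rest from rfl,
          List.filter_append, hhead, ih1, setRow_coords M i0 u row hPu]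
      · show (((1 + (aOddStep M rest).2 : Nat)) : Int) + _ = _
        rw [show coordsAux M i0 (row :: rest)
            = rowCoords M i0 row ++ coordsAux M (i0+1) rest from rfl,
          List.filter_append, hhead]
        simp only [List.length_append]
        push_cast at ih2 hcnt ⊢
        omega

-- ---- one even trial ----

theorem colEq_of_set (g : List (List Int)) (t j j' i : Nat)
    (h : (g.getD t []).getD j 0 = 1) (hne : j' ≠ j) :
    (((g.set t ((g.getD t []).set j 0)).getD i []).getD j' 0) = (g.getD i []).getD j' 0 := by
  have htg : t < g.length := getD_grid_lt g t j h
  by_cases hit : i = t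
  · rw [hit, pvGetDSetSelf g t _ [] htg, pvGetDSetNe (g.getD t []) j j' 0 0 hne]
  · rw [pvGetDSetNe g t i _ [] hit]

theorem cmaxI_set (g : List (List Int)) (t j j' : Nat)
    (h : (g.getD t []).getD j 0 = 1) (hne : j' ≠ j) :
    cmaxI (g.set t ((g.getD t []).set j 0)) j' = cmaxI g j' := by
  unfold cmaxI
  rw [List.length_set]
  congr 1
  apply dfind_congr
  intro i _
  rw [colEq_of_set g t j j' i h hne]

theorem evenStep_main (M : Nat) : ∀ (js : List Nat) (g : List (List Int)),
    js.Nodup → (∀ j ∈ js, j < M) →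
    coordsAux M 0 (aEvenStep g.length g js).1
        = (coordsAux M 0 g).filter
            (fun p => !(js.any (fun j => (p.2 == (j : Int)) && (p.1 == cmaxI g j))))
    ∧ ((aEvenStep g.length g js).2 : Int)
        + (((coordsAux M 0 g).filter
            (fun p => !(js.any (fun j => (p.2 == (j : Int)) && (p.1 == cmaxI g j))))).length : Int)
      = ((coordsAux M 0 g).length : Int) := by
  intro js
  induction js with
  | nil =>
    intro g _ _
    constructor
    · show coordsAux M 0 g = _
      rw [eq_comm]
      apply List.filter_eq_self.mpr
      intro p _
      rfl
    · show ((0 : Nat) : Int) + _ = _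
      rw [show (coordsAux M 0 g).filter
            (fun p => !(List.any ([] : List Nat)
              (fun j => (p.2 == ((j : Nat) : Int)) && (p.1 == cmaxI g j))))
          = coordsAux M 0 g from List.filter_eq_self.mpr (fun p _ => rfl)]
      push_cast
      omega
  | cons j js ih =>
    intro g hnd hbound
    obtain ⟨hjnotin, hnd'⟩ := List.nodup_cons.mp hnd
    have hjM : j < M := hbound j (List.mem_cons_self ..)
    cases hd : dfind (fun i => (g.getD i []).getD j 0 == 1) g.length with
    | none =>
      have hscan : aColScan g j g.length = (g, false) := by
        rw [aColScan_eq g j g.length, hd]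
      have h1 : (aEvenStep g.length g (j :: js)).1 = (aEvenStep g.length g js).1 := by
        show (aEvenStep g.length (aColScan g j g.length).1 js).1 = _
        rw [hscan]
      have h2 : ((aEvenStep g.length g (j :: js)).2 : Int)
          = ((aEvenStep g.length g js).2 : Int) := by
        show (((if (aColScan g j g.length).2 then 1 else 0)
            + (aEvenStep g.length (aColScan g j g.length).1 js).2 : Nat) : Int) = _
        rw [hscan]
        show (((0 + (aEvenStep g.length g js).2 : Nat)) : Int) = _
        push_cast
        omega
      have hcm : cmaxI g j = -1 := by unfold cmaxI dToInt; rw [hd]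
      have hpred : ∀ p ∈ coordsAux M 0 g,
          (!((j :: js).any (fun j' => (p.2 == (j' : Int)) && (p.1 == cmaxI g j'))))
            = (!(js.any (fun j' => (p.2 == (j' : Int)) && (p.1 == cmaxI g j')))) := by
        intro p hp
        rcases (mem_coordsAux M g 0 p).mp hp with ⟨t, j', ht, hj', hv, rfl⟩
        simp only [List.any_cons]
        rw [hcm]
        simp
      obtain ⟨ih1, ih2⟩ := ih g hnd' (fun x hx => hbound x (List.mem_cons_of_mem _ hx))
      have hEQ0 := (List.filter_congr hpred).symm
      constructor
      · rw [h1, ih1, hEQ0]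
      · rw [h2, ← hEQ0]
        exact ih2
    | some u =>
      have hscan : aColScan g j g.length = (g.set u ((g.getD u []).set j 0), true) := by
        rw [aColScan_eq g j g.length, hd]
      have hPu : (g.getD u []).getD j 0 = 1 := by
        have hp := dfind_some_P _ _ u hd
        simpa using hp
      have hcm : cmaxI g j = (u : Int) := by unfold cmaxI dToInt; rw [hd]
      have hlen' : (g.set u ((g.getD u []).set j 0)).length = g.length := List.length_set ..
      have h1 : (aEvenStep g.length g (j :: js)).1
          = (aEvenStep (g.set u ((g.getD u []).set j 0)).length
              (g.set u ((g.getD u []).set j 0)) js).1 := by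
        show (aEvenStep g.length (aColScan g j g.length).1 js).1 = _
        rw [hscan, hlen']
      have h2 : ((aEvenStep g.length g (j :: js)).2 : Int)
          = 1 + ((aEvenStep (g.set u ((g.getD u []).set j 0)).length
              (g.set u ((g.getD u []).set j 0)) js).2 : Int) := by
        show (((if (aColScan g j g.length).2 then 1 else 0)
            + (aEvenStep g.length (aColScan g j g.length).1 js).2 : Nat) : Int) = _
        rw [hscan, ← hlen']
        show (((1 + (aEvenStep (g.set u ((g.getD u []).set j 0)).length
            (g.set u ((g.getD u []).set j 0)) js).2 : Nat)) : Int) = _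
        push_cast
        omega
      obtain ⟨ih1, ih2⟩ := ih (g.set u ((g.getD u []).set j 0)) hnd'
        (fun x hx => hbound x (List.mem_cons_of_mem _ hx))
      have hset := setGrid_coords M g 0 u j hPu hjM
      have hcm' : ∀ j', j' ∈ js →
          cmaxI (g.set u ((g.getD u []).set j 0)) j' = cmaxI g j' := by
        intro j' hj'
        exact cmaxI_set g u j j' hPu (fun hh => hjnotin (hh ▸ hj'))
      have hpredS : ∀ p ∈ coordsAux M 0 (g.set u ((g.getD u []).set j 0)),
          (!(js.any (fun j' => (p.2 == (j' : Int))
              && (p.1 == cmaxI (g.set u ((g.getD u []).set j 0)) j'))))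
            = (!(js.any (fun j' => (p.2 == (j' : Int)) && (p.1 == cmaxI g j')))) := by
        intro p _
        congr 1
        apply pvAnyCongr
        intro j' hj'
        rw [hcm' j' hj']
      have hcomb : ∀ p ∈ coordsAux M 0 g,
          ((!((p.1 == ((0 + u : Nat) : Int)) && (p.2 == (j : Int))))
            && (!(js.any (fun j' => (p.2 == (j' : Int)) && (p.1 == cmaxI g j')))))
          = (!((j :: js).any (fun j' => (p.2 == (j' : Int)) && (p.1 == cmaxI g j')))) := by
        intro p hp
        rcases (mem_coordsAux M g 0 p).mp hp with ⟨t, j'', ht, hj'', hv, rfl⟩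
        simp only [List.any_cons]
        by_cases hjj : j'' = j
        · subst hjj
          rw [hcm]
          have hanyf : (js.any fun j' => (((j'' : Nat) : Int) == ((j' : Nat) : Int))
              && ((((0 + t : Nat) : Int)) == cmaxI g j')) = false := by
            apply List.any_eq_false.mpr
            intro x hx
            have hxne : (((j'' : Nat) : Int) == ((x : Nat) : Int)) = false :=
              beq_eq_false_iff_ne.mpr (by
                intro hh
                exact hjnotin (by rw [show j'' = x from by exact_mod_cast hh]; exact hx))
            simp [hxne]
          rw [hanyf]
          have h0u : ((0 + u : Nat) : Int) = ((u : Nat) : Int) := by norm_num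
          rw [h0u]
          simp [pvBeqComm]
        · have hf1 : (((j'' : Nat) : Int) == ((j : Nat) : Int)) = false :=
            beq_eq_false_iff_ne.mpr (fun hh => hjj (by exact_mod_cast hh))
          simp [hf1]
      have hEQ : (coordsAux M 0 (g.set u ((g.getD u []).set j 0))).filter
            (fun p => !(js.any (fun j' => (p.2 == (j' : Int))
              && (p.1 == cmaxI (g.set u ((g.getD u []).set j 0)) j'))))
          = (coordsAux M 0 g).filter
            (fun p => !((j :: js).any (fun j' => (p.2 == (j' : Int)) && (p.1 == cmaxI g j')))) := by
        rw [List.filter_congr hpredS, hset, pvFilterFilter]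
        exact List.filter_congr hcomb
      have hlen1 := setGrid_len M g 0 u j hPu hjM
      have hcoordlen : (coordsAux M 0 (g.set u ((g.getD u []).set j 0))).length + 1
          = (coordsAux M 0 g).length := by
        rw [hset]
        exact hlen1
      constructor
      · rw [h1, ih1, hEQ]
      · rw [h2]
        have hlenEQ := congrArg List.length hEQ
        push_cast at ih2 ⊢
        omega

-- ---- initial coordinate list and balloon count ----

theorem bS_eq (L : List (List Int)) (M : Nat) :
    bS L L.length M = coordsAux M 0 L := by
  rw [coordsAux_flat M L 0]
  apply pvFlatMapCongr
  intro t _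
  show (List.range M).filterMap
      (fun j => if (L.getD t []).getD j 0 = 1 then some ((t : Int), (j : Int)) else none)
      = rowCoords M (0 + t) (L.getD t [])
  rw [show (0 + t : Nat) = t from by omega]
  rfl

theorem countRow (M i : Nat) (row : List Int) : ∀ acc : Int,
    (List.range M).foldl (fun a j => if row.getD j 0 = 1 then a + 1 else a) acc
      = acc + ((rowCoords M i row).length : Int) := by
  induction M with
  | zero => intro acc; simp [rowCoords]
  | succ M ih =>
    intro acc
    have hsingle : ∀ a : Int,
        List.foldl (fun a j => if row.getD j 0 = 1 then a + 1 else a) a [M]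
          = if row.getD M 0 = 1 then a + 1 else a := fun a => rfl
    rw [List.range_succ, List.foldl_append, ih, hsingle, rowCoords_succ, List.length_append]
    by_cases hc : row.getD M 0 = 1
    · rw [if_pos hc, if_pos hc]
      simp only [List.length_cons, List.length_nil]
      push_cast
      ring
    · rw [if_neg hc, if_neg hc]
      simp only [List.length_nil]
      push_cast
      ring

theorem countAll (M : Nat) : ∀ (g : List (List Int)) (i0 : Nat) (acc : Int),
    g.foldl (fun acc row =>
        (List.range M).foldl (fun a j => if row.getD j 0 = 1 then a + 1 else a) acc) acc
      = acc + ((coordsAux M i0 g).length : Int) := by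
  intro g
  induction g with
  | nil => intro i0 acc; simp [coordsAux]
  | cons row rest ih =>
    intro i0 acc
    show rest.foldl _
        ((List.range M).foldl (fun a j => if row.getD j 0 = 1 then a + 1 else a) acc)
      = acc + (((rowCoords M i0 row ++ coordsAux M (i0+1) rest).length : Nat) : Int)
    rw [countRow M i0 row acc, ih (i0+1), List.length_append]
    push_cast
    ring

-- ---- the two main loops agree ----

theorem range_any_single (M j0 : Nat) (hj : j0 < M) (b : Nat → Bool) :
    (List.range M).any (fun j => (((j0 : Nat) : Int) == ((j : Nat) : Int)) && b j) = b j0 := by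
  cases hb : b j0 with
  | true =>
    refine List.any_eq_true.mpr ⟨j0, List.mem_range.mpr hj, ?_⟩
    simp [hb]
  | false =>
    refine List.any_eq_false.mpr ?_
    intro x hx
    by_cases hxj : x = j0
    · subst hxj
      simp [hb]
    · have hbne : (((j0 : Nat) : Int) == ((x : Nat) : Int)) = false :=
        beq_eq_false_iff_ne.mpr (fun hh => hxj (by exact_mod_cast hh.symm))
      simp [hbne]

theorem loop_eq (M : Nat) : ∀ (fuel : Nat) (N : Nat) (g : List (List Int)) (result : Int),
    g.length = N →
    aLoop M N fuel g ((coordsAux M 0 g).length : Int) result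
      = bLoop fuel (coordsAux M 0 g) result := by
  intro fuel
  induction fuel with
  | zero => intro N g result _; rfl
  | succ fuel ih =>
    intro N g result hN
    rw [show aLoop M N (fuel+1) g ((coordsAux M 0 g).length : Int) result
        = (if ((coordsAux M 0 g).length : Int) > 0 then
             (if (result + 1) % 2 = 1 then
               aLoop M N fuel (aOddStep M g).1
                 (((coordsAux M 0 g).length : Int) - ((aOddStep M g).2 : Int)) (result + 1)
              else
               aLoop M N fuel (aEvenStep N g (List.range M)).1
                 (((coordsAux M 0 g).length : Int) - ((aEvenStep N g (List.range M)).2 : Int))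
                 (result + 1))
           else result) from rfl]
    rw [show bLoop (fuel+1) (coordsAux M 0 g) result
        = (if (coordsAux M 0 g).isEmpty then result
           else if (result + 1) % 2 = 1 then
             bLoop fuel ((coordsAux M 0 g).filter
               (fun p => !((bBestOdd (coordsAux M 0 g)).getD p.1 (-1) == p.2))) (result + 1)
           else
             bLoop fuel ((coordsAux M 0 g).filter
               (fun p => !((bBestEven (coordsAux M 0 g)).getD p.2 (-1) == p.1))) (result + 1))
        from rfl]
    by_cases hemp : coordsAux M 0 g = []
    · rw [hemp]
      rw [if_neg (by norm_num), if_pos (by rfl)]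
    · have hlen0 : (coordsAux M 0 g).length ≠ 0 :=
        fun hh => hemp (List.eq_nil_of_length_eq_zero hh)
      have hpos : ((coordsAux M 0 g).length : Int) > 0 := by push_cast; omega
      have hne : ¬((coordsAux M 0 g).isEmpty = true) := by
        intro hh
        exact hemp (List.isEmpty_iff.mp hh)
      rw [if_pos hpos, if_neg hne]
      by_cases hpar : (result + 1) % 2 = 1
      · rw [if_pos hpar, if_pos hpar]
        have hf : ∀ t, t < g.length →
            (fun q => (bBestOdd (coordsAux M 0 g)).getD q (-1)) ((0 + t : Nat) : Int)
              = rmaxI M (g.getD t []) := by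
          intro t ht
          show (bBestOdd (coordsAux M 0 g)).getD ((0 + t : Nat) : Int) (-1) = _
          unfold bBestOdd
          rw [maxfold_getD Prod.fst Prod.snd (coordsAux M 0 g) PySem.Dict.empty,
            PySem.Dict.getD_empty]
          exact bestOdd_getD M g 0 t ht
        obtain ⟨ho1, ho2⟩ := oddStep_main M g 0
          (fun q => (bBestOdd (coordsAux M 0 g)).getD q (-1)) hf
        have hbal : ((coordsAux M 0 g).length : Int) - ((aOddStep M g).2 : Int)
            = (((coordsAux M 0 g).filter
                (fun p => !((bBestOdd (coordsAux M 0 g)).getD p.1 (-1) == p.2))).length : Int) := by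
          push_cast at ho2 ⊢
          omega
        rw [hbal]
        have hg' : (aOddStep M g).1.length = N := by rw [length_aOddStep]; exact hN
        have hih := ih N (aOddStep M g).1 (result + 1) hg'
        rw [ho1] at hih
        exact hih
      · rw [if_neg hpar, if_neg hpar]
        have hpredB : ∀ p ∈ coordsAux M 0 g,
            (!((bBestEven (coordsAux M 0 g)).getD p.2 (-1) == p.1))
              = (!((List.range M).any
                  (fun j => (p.2 == ((j : Nat) : Int)) && (p.1 == cmaxI g j)))) := by
          intro p hp
          rcases (mem_coordsAux M g 0 p).mp hp with ⟨t, j0, ht, hj0, hv, rfl⟩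
          have hbv : (bBestEven (coordsAux M 0 g)).getD ((j0 : Nat) : Int) (-1) = cmaxI g j0 := by
            unfold bBestEven
            rw [maxfold_getD Prod.snd Prod.fst (coordsAux M 0 g) PySem.Dict.empty,
              PySem.Dict.getD_empty]
            rw [bvCol M j0 hj0 g 0 (-1)]
            unfold cmaxI dToInt
            cases hd : dfind (fun t => (g.getD t []).getD j0 0 == 1) g.length with
            | none => rfl
            | some u =>
              show (if (-1 : Int) < ((0 + u : Nat) : Int) then ((0 + u : Nat) : Int) else -1)
                  = ((u : Nat) : Int)
              rw [if_pos (by push_cast; omega)]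
              push_cast
              ring
          show (!((bBestEven (coordsAux M 0 g)).getD ((j0 : Nat) : Int) (-1)
                == ((0 + t : Nat) : Int)))
              = (!((List.range M).any
                  (fun j => (((j0 : Nat) : Int) == ((j : Nat) : Int))
                    && (((0 + t : Nat) : Int) == cmaxI g j))))
          rw [hbv, range_any_single M j0 hj0 (fun j => (((0 + t : Nat) : Int) == cmaxI g j)),
            pvBeqComm]
        obtain ⟨he1, he2⟩ := evenStep_main M (List.range M) g (List.nodup_range)
          (fun j hj => List.mem_range.mp hj)
        rw [hN] at he1 he2
        have hfilters : (coordsAux M 0 g).filter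
              (fun p => !((bBestEven (coordsAux M 0 g)).getD p.2 (-1) == p.1))
            = (coordsAux M 0 g).filter
              (fun p => !((List.range M).any
                (fun j => (p.2 == ((j : Nat) : Int)) && (p.1 == cmaxI g j)))) :=
          List.filter_congr hpredB
        have hbal : ((coordsAux M 0 g).length : Int) - ((aEvenStep N g (List.range M)).2 : Int)
            = (((coordsAux M 0 g).filter
                (fun p => !((bBestEven (coordsAux M 0 g)).getD p.2 (-1) == p.1))).length : Int) := by
          rw [hfilters]
          push_cast at he2 ⊢
          omega
        rw [hbal]
        have hg' : (aEvenStep N g (List.range M)).1.length = N := by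
          rw [length_aEvenStep]; exact hN
        have hih := ih N (aEvenStep N g (List.range M)).1 (result + 1) hg'
        rw [he1, ← hfilters] at hih
        exact hih

theorem popballoon_eq (L : List (List Int)) : popballoon L = popballoon_alt L := by
  show aLoop (L.headD []).length L.length
      ((L.foldl (fun (acc : Int) (row : List Int) => (List.range (L.headD []).length).foldl
        (fun a j => if row.getD j 0 = 1 then a + 1 else a) acc) 0).toNat + 1) L
      (L.foldl (fun (acc : Int) (row : List Int) => (List.range (L.headD []).length).foldl
        (fun a j => if row.getD j 0 = 1 then a + 1 else a) acc) 0) 0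
    = bLoop ((bS L L.length (L.headD []).length).length + 1)
        (bS L L.length (L.headD []).length) 0
  rw [countAll (L.headD []).length L 0 0, bS_eq L (L.headD []).length]
  rw [show (0 : Int) + (((coordsAux (L.headD []).length 0 L).length : Nat) : Int)
      = (((coordsAux (L.headD []).length 0 L).length : Nat) : Int) from by ring]
  rw [Int.toNat_natCast]
  exact loop_eq (L.headD []).length ((coordsAux (L.headD []).length 0 L).length + 1)
    L.length L 0 rfl

-- ===== VERDICT (by name: the statement is the Claim_ definition above) =====
theorem popballoon_spec : Claim_equal_popballoon := by
  intro L _ _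
  exact popballoon_eq L
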